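-- pv_equiv track=rewrite | github.com/atrium-research/T3.4.1_KeywordsTranslation | src/prompt.py | checking_schema_function
-- ===== SOURCE A (Python) =====
-- def checking_schema_function(answer: str) -> str:
--     try:
--         answer = answer.strip()
--         answer_comma_splitted = answer.split(",")
--         if len(answer_comma_splitted) == 1:
--             answer_dot_splitted = answer.split(".")
--             if len(answer_dot_splitted) == 1:
--                 answer_newline_splitted = answer.split("\n")
--                 if len(answer_newline_splitted) == 1:
--                     answer_space_splitted = answer.split(" ")
--                     if len(answer_space_splitted) == 1:
--                         return []
--                     else:
--                         return [uri.strip() for uri in answer_space_splitted]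
--                 else:
--                     return [uri.strip() for uri in answer_newline_splitted]
--             else:
--                 return [uri.strip() for uri in answer_dot_splitted]
--         else:
--             return [uri.strip() for uri in answer_comma_splitted]
--     except:
--         return None
-- ===== SOURCE B (Python) =====
-- def checking_schema_function(answer: str) -> str:
--     try:
--         s = answer.strip()
--         seen = set(s)
--         sep = next((d for d in ",.\n " if d in seen), None)
--         if sep is None:
--             return []
--         parts, cur = [], []
--         for ch in s:
--             if ch == sep:
--                 parts.append("".join(cur).strip())
--                 cur = []
--             else:
--                 cur.append(ch)
--         parts.append("".join(cur).strip())
--         return parts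
--     except:
--         return None
-- ===== Notes on version B (the rewrite author's own statement) =====
-- stated objective: alternative
-- what changed: Instead of calling str.split per delimiter and testing the resulting list length, B builds a character set in one pass to pick the highest-priority delimiter actually present, then performs a single manual character-by-character split with an accumulator, stripping each token as it is emitted.
import Mathlib
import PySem

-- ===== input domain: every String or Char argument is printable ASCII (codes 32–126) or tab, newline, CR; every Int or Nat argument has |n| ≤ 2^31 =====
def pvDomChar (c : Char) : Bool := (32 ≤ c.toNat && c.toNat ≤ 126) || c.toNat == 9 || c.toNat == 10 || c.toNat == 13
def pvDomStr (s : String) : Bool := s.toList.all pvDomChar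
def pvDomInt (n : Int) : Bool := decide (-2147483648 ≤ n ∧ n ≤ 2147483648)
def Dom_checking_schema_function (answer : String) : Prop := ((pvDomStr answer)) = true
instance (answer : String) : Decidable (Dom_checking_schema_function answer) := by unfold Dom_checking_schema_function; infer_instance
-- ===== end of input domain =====

-- B replaces A's per-delimiter str.split calls and nested length tests by a one-pass
-- character-set membership choice of the delimiter followed by a single manual
-- character-by-character split (alternative decomposition, same values; strings never
-- trigger the except branch, so the result is always `some _`).

-- ===== PORT A =====
-- Python s.split(sep) for a nonempty literal sep (A calls str.split four times)
def pySplit (s sep : String) : List String :=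
  (PySem.Chars.splitOn s.toList sep.toList).map String.ofList

def checking_schema_function (answer : String) : Option (List String) :=
  let a := PySem.Str.strip answer
  let c := pySplit a ","
  if c.length = 1 then
    let d := pySplit a "."
    if d.length = 1 then
      let n := pySplit a "\n"
      if n.length = 1 then
        let sp := pySplit a " "
        if sp.length = 1 then some []
        else some (sp.map PySem.Str.strip)
      else some (n.map PySem.Str.strip)
    else some (d.map PySem.Str.strip)
  else some (c.map PySem.Str.strip)

-- ===== PORT B =====
-- Source B's inner loop: manual split of the char list on the single char `sep`,
-- appending each finished token already stripped (parts/cur accumulator).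
def csfSplitStrip (sep : Char) : List Char → List Char → List String
  | [], cur => [PySem.Str.strip (String.ofList cur.reverse)]
  | ch :: rest, cur =>
    if ch = sep then
      PySem.Str.strip (String.ofList cur.reverse) :: csfSplitStrip sep rest []
    else csfSplitStrip sep rest (ch :: cur)

def checking_schema_function_alt (answer : String) : Option (List String) :=
  let s := PySem.Str.strip answer
  let seen : PySem.Set Char := PySem.Set.ofList s.toList
  match [',', '.', '\n', ' '].find? (fun d => PySem.Set.contains seen d) with
  | none => some []
  | some sep => some (csfSplitStrip sep s.toList [])

-- ===== PRECONDITION & SPEC =====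
def Spec_checking_schema_function (answer : String) (out : Option (List String)) : Prop := out = checking_schema_function_alt answer
instance (answer : String) (out : Option (List String)) : Decidable (Spec_checking_schema_function answer out) := by unfold Spec_checking_schema_function; infer_instance

-- ===== CLAIM (what is proved, stated in full; the proofs are below) =====
def Claim_equal_checking_schema_function : Prop := ∀ (answer : String), Dom_checking_schema_function answer → Spec_checking_schema_function answer (checking_schema_function answer)

-- ===== LEMMAS AND PROOFS =====

-- plain single-char splitter (proof-side mirror of csfSplitStrip, without the strip/ofList)
def csfSplitC (sep : Char) : List Char → List Char → List (List Char)
  | [], cur => [cur.reverse]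
  | ch :: rest, cur =>
    if ch = sep then cur.reverse :: csfSplitC sep rest []
    else csfSplitC sep rest (ch :: cur)

theorem csf_go_eq_splitC (c : Char) :
    ∀ (l : List Char) (fuel : Nat) (cur : List Char) (acc : List (List Char)),
      l.length < fuel →
      PySem.Chars.splitOn.go [c] fuel l cur acc = acc.reverse ++ csfSplitC c l cur := by
  intro l
  induction l with
  | nil =>
    intro fuel cur acc h
    cases fuel with
    | zero => omega
    | succ n => simp [PySem.Chars.splitOn.go, csfSplitC]
  | cons x rest ih =>
    intro fuel cur acc h
    cases fuel with
    | zero => simp at h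
    | succ n =>
      rw [PySem.Chars.splitOn.go]
      by_cases hx : x = c
      · subst hx
        simp only [List.isPrefixOf, BEq.rfl, Bool.and_true, if_pos, List.length_cons,
          List.length_nil, List.drop_succ_cons, List.drop_zero]
        rw [ih n [] (cur.reverse :: acc) (by simpa using h)]
        simp [csfSplitC]
      · have : ([c].isPrefixOf (x :: rest)) = false := by
          simp [List.isPrefixOf]
          exact fun hc => (hx hc.symm).elim
        rw [this]
        simp only [Bool.false_eq_true, if_false]
        rw [ih n (x :: cur) acc (by simpa using h)]
        simp [csfSplitC, hx]

theorem csf_splitOn_eq (c : Char) (l : List Char) :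
    PySem.Chars.splitOn l [c] = csfSplitC c l [] := by
  unfold PySem.Chars.splitOn
  simpa using csf_go_eq_splitC c l (l.length + 1) [] [] (by omega)

theorem csf_splitC_length (c : Char) :
    ∀ (l cur : List Char), (csfSplitC c l cur).length = l.count c + 1 := by
  intro l
  induction l with
  | nil => intro cur; simp [csfSplitC]
  | cons x rest ih =>
    intro cur
    by_cases hx : x = c
    · subst hx; simp [csfSplitC, ih]
    · simp [csfSplitC, hx, ih]

theorem csf_splitC_map_strip (c : Char) :
    ∀ (l cur : List Char),
      (csfSplitC c l cur).map (fun p => PySem.Str.strip (String.ofList p)) =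
        csfSplitStrip c l cur := by
  intro l
  induction l with
  | nil => intro cur; simp [csfSplitC, csfSplitStrip]
  | cons x rest ih =>
    intro cur
    by_cases hx : x = c
    · subst hx; simp [csfSplitC, csfSplitStrip, ih]
    · simp [csfSplitC, csfSplitStrip, hx, ih]

-- A's `[uri.strip() for uri in a.split(d)]` for a single-char d equals B's manual pass
theorem csf_map_strip_pySplit (a : String) (d : String) (c : Char)
    (hd : d.toList = [c]) :
    (pySplit a d).map PySem.Str.strip = csfSplitStrip c a.toList [] := by
  unfold pySplit
  rw [hd, csf_splitOn_eq, List.map_map, ← csf_splitC_map_strip]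
  rfl

theorem csf_pySplit_length (a : String) (d : String) (c : Char)
    (hd : d.toList = [c]) :
    (pySplit a d).length = a.toList.count c + 1 := by
  unfold pySplit
  rw [hd, csf_splitOn_eq, List.length_map, csf_splitC_length]

theorem csf_count_eq_zero_iff (c : Char) (l : List Char) :
    l.count c = 0 ↔ c ∉ l := List.count_eq_zero

-- ===== VERDICT (by name: the statement is the Claim_ definition above) =====
theorem checking_schema_function_spec : Claim_equal_checking_schema_function := by
  intro answer _
  unfold Spec_checking_schema_function checking_schema_function checking_schema_function_alt
  generalize PySem.Str.strip answer = a
  simp only []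
  have hlen : ∀ (d : String) (c : Char), d.toList = [c] →
      ((pySplit a d).length = 1 ↔ c ∉ a.toList) := by
    intro d c hd
    rw [csf_pySplit_length a d c hd]
    constructor
    · intro h; exact (csf_count_eq_zero_iff c a.toList).mp (by omega)
    · intro h; rw [(csf_count_eq_zero_iff c a.toList).mpr h]
  by_cases h1 : ',' ∈ a.toList
  · rw [if_neg (by rw [hlen "," ',' rfl]; simpa using h1)]
    rw [show ([',', '.', '\n', ' '].find? (fun d => PySem.Set.contains (PySem.Set.ofList a.toList) d)) = some ',' by
      simp [List.find?, PySem.Set.contains, PySem.Set.mem_ofList, h1]]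
    rw [csf_map_strip_pySplit a "," ',' rfl]
  · have e1 := (hlen "," ',' rfl).mpr h1
    rw [if_pos e1]
    by_cases h2 : '.' ∈ a.toList
    · rw [if_neg (by rw [hlen "." '.' rfl]; simpa using h2)]
      rw [show ([',', '.', '\n', ' '].find? (fun d => PySem.Set.contains (PySem.Set.ofList a.toList) d)) = some '.' by
        simp [List.find?, PySem.Set.contains, PySem.Set.mem_ofList, h1, h2]]
      rw [csf_map_strip_pySplit a "." '.' rfl]
    · rw [if_pos ((hlen "." '.' rfl).mpr h2)]
      by_cases h3 : '\n' ∈ a.toList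
      · rw [if_neg (by rw [hlen "\n" '\n' rfl]; simpa using h3)]
        rw [show ([',', '.', '\n', ' '].find? (fun d => PySem.Set.contains (PySem.Set.ofList a.toList) d)) = some '\n' by
          simp [List.find?, PySem.Set.contains, PySem.Set.mem_ofList, h1, h2, h3]]
        rw [csf_map_strip_pySplit a "\n" '\n' rfl]
      · rw [if_pos ((hlen "\n" '\n' rfl).mpr h3)]
        by_cases h4 : ' ' ∈ a.toList
        · rw [if_neg (by rw [hlen " " ' ' rfl]; simpa using h4)]
          rw [show ([',', '.', '\n', ' '].find? (fun d => PySem.Set.contains (PySem.Set.ofList a.toList) d)) = some ' ' by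
            simp [List.find?, PySem.Set.contains, PySem.Set.mem_ofList, h1, h2, h3, h4]]
          rw [csf_map_strip_pySplit a " " ' ' rfl]
        · rw [if_pos ((hlen " " ' ' rfl).mpr h4)]
          rw [show ([',', '.', '\n', ' '].find? (fun d => PySem.Set.contains (PySem.Set.ofList a.toList) d)) = none by
            simp [List.find?, PySem.Set.contains, PySem.Set.mem_ofList, h1, h2, h3, h4]]
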